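-- pv_equiv track=rewrite | github.com/Tanmay160301/Python-Repository | Python usecases/reverse_keeping_special_symbols.py | reverse_keeping_special_symbols
-- ===== SOURCE A (Python) =====
-- def reverse_keeping_special_symbols(text):
--     temp = text
--     for char in temp:
--         if not char.isalnum():
--             temp = temp.replace(char,'')
--     reversed_text = temp[::-1]
--     reversed_text_list = list(reversed_text)
--     for i in range(0,len(text)):
--         if not text[i].isalnum():
--             reversed_text_list.insert(i,text[i])
--
--     reversed_text = "".join(reversed_text_list)
--     return reversed_text
-- ===== SOURCE B (Python) =====
-- def reverse_keeping_special_symbols(text):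
--     stack = [c for c in text if c.isalnum()]
--     out = []
--     for c in text:
--         out.append(stack.pop() if c.isalnum() else c)
--     return "".join(out)
-- ===== Notes on version B (the rewrite author's own statement) =====
-- stated objective: alternative
-- what changed: A strips non-alnum chars by repeated str.replace scans, reverses, and re-inserts each special char with list.insert at its index; B makes one pass over the text, popping a pre-collected stack of alphanumeric characters at alnum positions and copying special characters through.
import Mathlib
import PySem

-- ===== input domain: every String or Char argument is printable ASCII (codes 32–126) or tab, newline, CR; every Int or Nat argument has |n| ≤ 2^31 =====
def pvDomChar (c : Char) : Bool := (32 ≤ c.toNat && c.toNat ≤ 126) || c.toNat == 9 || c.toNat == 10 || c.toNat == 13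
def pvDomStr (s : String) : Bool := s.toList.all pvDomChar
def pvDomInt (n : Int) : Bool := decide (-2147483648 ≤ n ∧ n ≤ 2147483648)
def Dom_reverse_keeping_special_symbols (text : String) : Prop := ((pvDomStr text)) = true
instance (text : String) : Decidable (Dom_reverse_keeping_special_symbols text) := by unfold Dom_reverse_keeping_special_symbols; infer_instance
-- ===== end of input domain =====

-- B replaces A's repeated replace()-scan + positional-insert scheme by one pass that pops the
-- collected alphanumeric characters from the end of a stack (objective: alternative algorithm).

-- ===== PORT A =====
-- literal port of A; strings are handled as List Char ("".join over 1-char strings = String.ofList, exact)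
def reverse_keeping_special_symbols (text : String) : String :=
  let cs := text.toList
  -- for char in temp: if not char.isalnum(): temp = temp.replace(char, '')
  let temp := cs.foldl (fun t c => if !(PySem.Chars.isalnum c) then PySem.Chars.replace t [c] [] else t) cs
  -- reversed_text = temp[::-1]
  let reversed_text := (PySem.List.slice? temp none none (-1)).getD []
  -- for i in range(0, len(text)): if not text[i].isalnum(): reversed_text_list.insert(i, text[i])
  let rl := (PySem.List.pyRange 0 (cs.length : Int)).foldl
    (fun L i =>
      match PySem.List.pyGet? cs i with
      | some c => if !(PySem.Chars.isalnum c) then PySem.List.insert L i c else L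
      | none => L) reversed_text
  String.ofList rl

-- ===== PORT B =====
-- literal port of B (Source B): stack of the alnum chars, one pass popping from its end
def reverse_keeping_special_symbols_alt (text : String) : String :=
  let cs := text.toList
  let stack := cs.filter (fun c => PySem.Chars.isalnum c)
  let st := cs.foldl
    (fun (st : List Char × List Char) c =>
      if PySem.Chars.isalnum c then
        match PySem.List.pop? st.1 with
        | some (x, rest) => (rest, st.2 ++ [x])
        | none => (st.1, st.2 ++ [c])   -- unreachable: the stack holds exactly the alnum chars
      else (st.1, st.2 ++ [c])) (stack, [])
  String.ofList st.2

-- ===== PRECONDITION & SPEC =====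
def Spec_reverse_keeping_special_symbols (text : String) (out : String) : Prop := out = reverse_keeping_special_symbols_alt text
instance (text : String) (out : String) : Decidable (Spec_reverse_keeping_special_symbols text out) := by unfold Spec_reverse_keeping_special_symbols; infer_instance

-- ===== CLAIM (what is proved, stated in full; the proofs are below) =====
def Claim_equal_reverse_keeping_special_symbols : Prop := ∀ (text : String), Dom_reverse_keeping_special_symbols text → Spec_reverse_keeping_special_symbols text (reverse_keeping_special_symbols text)

-- ===== LEMMAS AND PROOFS =====

-- common value of both loops: copy the text, drawing the alnum positions from rev in order
def zipFill : List Char → List Char → List Char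
  | [], rev => rev
  | c :: cs, rev =>
    if PySem.Chars.isalnum c then
      match rev with
      | [] => zipFill cs []
      | r :: rs => r :: zipFill cs rs
    else c :: zipFill cs rev

lemma go_single (c : Char) : ∀ (fuel : Nat) (l acc : List Char), l.length ≤ fuel →
    PySem.Chars.replace.go [c] [] fuel l acc = acc.reverse ++ l.filter (fun x => x != c) := by
  intro fuel
  induction fuel with
  | zero =>
    intro l acc h
    have : l = [] := List.length_eq_zero_iff.mp (Nat.le_zero.mp h)
    subst this
    simp [PySem.Chars.replace.go]
  | succ n ih =>
    intro l acc h
    cases l with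
    | nil => simp [PySem.Chars.replace.go]
    | cons x t =>
      have ht : t.length ≤ n := by simpa using h
      rw [PySem.Chars.replace.go]
      simp only [List.isPrefixOf]
      by_cases hx : x = c
      · subst hx
        simp only [BEq.refl, Bool.and_true, if_pos, List.length_cons, List.length_nil,
          List.drop_succ_cons, List.drop_zero, List.reverse_nil, List.nil_append]
        rw [ih t acc ht]
        simp
      · have hbe : (c == x) = false := by
          simp only [beq_eq_false_iff_ne, ne_eq]; exact fun hh => hx hh.symm
        simp only [hbe, Bool.false_and, Bool.false_eq_true, if_false]
        rw [ih t (x :: acc) ht]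
        simp [hx]

lemma replace_single (s : List Char) (c : Char) :
    PySem.Chars.replace s [c] [] = s.filter (fun x => x != c) := by
  rw [PySem.Chars.replace]
  simp only [List.isEmpty_cons, if_false, Bool.false_eq_true]
  exact go_single c s.length s [] (le_refl _)

lemma first_loop (l t : List Char) :
    l.foldl (fun t c => if !(PySem.Chars.isalnum c) then PySem.Chars.replace t [c] [] else t) t
      = t.filter (fun x => PySem.Chars.isalnum x || !(l.contains x)) := by
  induction l generalizing t with
  | nil => simp
  | cons c l ih =>
    simp only [List.foldl_cons]
    by_cases hc : PySem.Chars.isalnum c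
    · rw [hc]
      simp only [Bool.not_true, Bool.false_eq_true, if_false]
      rw [ih t]
      apply List.filter_congr
      intro x _
      by_cases hxc : x = c
      · subst hxc; simp [hc]
      · simp [hxc]
    · rw [Bool.not_eq_true] at hc
      rw [hc]
      simp only [Bool.not_false, if_pos]
      rw [replace_single, ih, List.filter_filter]
      apply List.filter_congr
      intro x _
      by_cases hxc : x = c
      · subst hxc; simp [hc]
      · simp [hxc]

lemma first_loop_self (cs : List Char) :
    cs.foldl (fun t c => if !(PySem.Chars.isalnum c) then PySem.Chars.replace t [c] [] else t) cs
      = cs.filter (fun c => PySem.Chars.isalnum c) := by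
  rw [first_loop]
  apply List.filter_congr
  intro x hx
  simp [hx]

lemma insert_loop (full : List Char) : ∀ (cs2 : List Char) (d : Nat) (P rev : List Char),
    full.drop d = cs2 → P.length = d → (cs2.filter (fun c => PySem.Chars.isalnum c)).length ≤ rev.length →
    (List.range' d cs2.length).foldl
      (fun L k =>
        match full[k]? with
        | some c => if !(PySem.Chars.isalnum c) then PySem.List.insert L (k : Int) c else L
        | none => L) (P ++ rev)
      = P ++ zipFill cs2 rev := by
  intro cs2
  induction cs2 with
  | nil => intro d P rev _ _ _; simp [zipFill]
  | cons c t ih =>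
    intro d P rev hfull hP hlen
    have hget : full[d]? = some c := by
      rw [← List.head?_drop, hfull]; rfl
    have hdrop : full.drop (d + 1) = t := by
      have h1 : full.drop (d + 1) = (full.drop d).drop 1 := by
        rw [List.drop_drop]
      rw [h1, hfull]
      rfl
    simp only [List.length_cons, List.range'_succ, List.foldl_cons, hget]
    by_cases hc : PySem.Chars.isalnum c
    · rw [hc]
      simp only [Bool.not_true, Bool.false_eq_true, if_false]
      obtain ⟨r, rs, hrev⟩ : ∃ r rs, rev = r :: rs := by
        cases rev with
        | nil => exfalso; simp [hc] at hlen
        | cons r rs => exact ⟨r, rs, rfl⟩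
      subst hrev
      have := ih (d + 1) (P ++ [r]) rs hdrop (by simp [hP]) (by
        simpa [List.filter_cons, hc] using hlen)
      rw [show P ++ r :: rs = (P ++ [r]) ++ rs by simp, this]
      simp [zipFill, hc]
    · rw [Bool.not_eq_true] at hc
      rw [hc]
      simp only [Bool.not_false, if_pos]
      have hins : PySem.List.insert (P ++ rev) (d : Int) c = (P ++ [c]) ++ rev := by
        rw [PySem.List.insert_natCast _ _ _ (by simp [hP])]
        rw [← hP, List.take_left, List.drop_left]
        simp
      rw [hins]
      have := ih (d + 1) (P ++ [c]) rev hdrop (by simp [hP]) (by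
        simpa [List.filter_cons, hc] using hlen)
      rw [this]
      simp [zipFill, hc]

lemma b_loop : ∀ (cs2 : List Char) (rev out : List Char),
    (cs2.filter (fun c => PySem.Chars.isalnum c)).length = rev.length →
    (cs2.foldl
      (fun (st : List Char × List Char) c =>
        if PySem.Chars.isalnum c then
          match PySem.List.pop? st.1 with
          | some (x, rest) => (rest, st.2 ++ [x])
          | none => (st.1, st.2 ++ [c])
        else (st.1, st.2 ++ [c])) (rev.reverse, out)).2
      = out ++ zipFill cs2 rev := by
  intro cs2
  induction cs2 with
  | nil =>
    intro rev out h
    have : rev = [] := List.length_eq_zero_iff.mp (by simpa using h.symm)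
    subst this
    simp [zipFill]
  | cons c t ih =>
    intro rev out h
    simp only [List.foldl_cons]
    by_cases hc : PySem.Chars.isalnum c
    · rw [hc]
      simp only [if_pos]
      obtain ⟨r, rs, hrev⟩ : ∃ r rs, rev = r :: rs := by
        cases rev with
        | nil => exfalso; simp [hc] at h
        | cons r rs => exact ⟨r, rs, rfl⟩
      subst hrev
      rw [show (r :: rs).reverse = rs.reverse ++ [r] by simp]
      rw [PySem.List.pop?_last]
      have := ih rs (out ++ [r]) (by simpa [List.filter_cons, hc] using h)
      simp only at this ⊢
      rw [this]
      simp [zipFill, hc]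
    · rw [Bool.not_eq_true] at hc
      rw [hc]
      simp only [Bool.false_eq_true, if_false]
      have := ih rev (out ++ [c]) (by simpa [List.filter_cons, hc] using h)
      simp only at this ⊢
      rw [this]
      simp [zipFill, hc]

lemma main_eq (text : String) :
    reverse_keeping_special_symbols text = reverse_keeping_special_symbols_alt text := by
  unfold reverse_keeping_special_symbols reverse_keeping_special_symbols_alt
  simp only []
  set cs := text.toList with hcs
  rw [first_loop_self]
  rw [PySem.List.slice?_none_none_neg_one]
  simp only [Option.getD_some]
  rw [PySem.List.pyRange_zero_natCast, List.foldl_map, List.range_eq_range']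
  simp only [PySem.List.pyGet?_natCast]
  have hA := insert_loop cs cs 0 [] ((cs.filter (fun c => PySem.Chars.isalnum c)).reverse)
    (by simp) rfl (by simp)
  simp only [List.nil_append] at hA
  rw [hA]
  have hB := b_loop cs ((cs.filter (fun c => PySem.Chars.isalnum c)).reverse) []
    (by simp)
  rw [List.reverse_reverse] at hB
  simp only [List.nil_append] at hB
  rw [hB]

-- ===== VERDICT (by name: the statement is the Claim_ definition above) =====
theorem reverse_keeping_special_symbols_spec : Claim_equal_reverse_keeping_special_symbols := by
  intro text _
  unfold Spec_reverse_keeping_special_symbols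
  exact main_eq text
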